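/- GENERATED by tools/from_farm_form.py from prooffarm-gif/accepted/DGifDecompressInput.2/Lemmas.lean (a worked proof of the farm's unit `DGifDecompressInput.2`,
   accepted by the verdict) — do not edit. -/
import Gif.Spec.Units.DGifDecompressInput_2
import Gif.Spec.AllSegs

/-!
  Lemmas for the unit `DGifDecompressInput.2` (ONE ROUND of the fill loop l.1083-1091 of `DGifDecompressInput`, a PROTECTED function):
  the segment is walked in TWO STEPS that meet at the return address 0x106829 (`ret4`) of the call of `DGifBufferedInput`, with a
  private assertion there.

      di2_lzloop_carry   `LZLoop` through a memory that agrees on `[pv + 8, pv + 44)`, with the new `CrntShiftState` in range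
      di2_Scratch        the windows a round stores to besides the callee's: the stack below the body's `rsp`, `[pv + 44, pv + 56)`
      di2_body_carry     `Body` through a footprint of `di2_Scratch` windows (the analogue of `DGifDecompressLine.Body.carry_lz`)
      di2_AtRet4         the assertion at `ret4`: `Body` + what is live there
      di2_seg_head       0x106807 … 0x10688e (`Tail`: the loop's test failed) | the call … 0x106829 (`di2_AtRet4`)
      di2_seg_tail       0x106829 … 0x106874 (`Done`: the callee failed) | 0x106807 (`Head` with a smaller measure)
-/

open X86 X86.User Asan ProgX.Base ProgX.Base.Spec Gif.Spec

set_option maxRecDepth 4000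
set_option maxHeartbeats 4000000

namespace Gif.Spec.DGifDecompressInput_2

/-- **`LZLoop` through a memory that agrees on `[pv + 8, pv + 44)`** (BitsPerPixel … StackPtr), when the NEW `CrntShiftState` is in
the loop's range (stated against the OLD `RunningBits`, which is also the new one). -/
theorem di2_lzloop_carry {mem mem' : Mem} {pv : Nat} (h : DGifDecompressInput.LZLoop mem pv)
    (he : Mem.EqOn (pv + 8) (pv + 44) mem mem') (hp : pv + 48 < 2 ^ 64)
    (hsh : GifFilePrivateType.CrntShiftState mem' pv ≤ 11 ∨
      GifFilePrivateType.CrntShiftState mem' pv ≤ GifFilePrivateType.RunningBits mem pv + 7) :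
    DGifDecompressInput.LZLoop mem' pv ∧
      GifFilePrivateType.RunningBits mem' pv = GifFilePrivateType.RunningBits mem pv := by
  have e1 : GifFilePrivateType.BitsPerPixel mem' pv = GifFilePrivateType.BitsPerPixel mem pv := by
    simp only [gfield]
    exact he.rd (pv + 8) 4 (by omega) (by omega) (by omega)
  have e2 : GifFilePrivateType.ClearCode mem' pv = GifFilePrivateType.ClearCode mem pv := by
    simp only [gfield]
    exact he.rd (pv + 12) 4 (by omega) (by omega) (by omega)
  have e3 : GifFilePrivateType.EOFCode mem' pv = GifFilePrivateType.EOFCode mem pv := by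
    simp only [gfield]
    exact he.rd (pv + 16) 4 (by omega) (by omega) (by omega)
  have e4 : GifFilePrivateType.RunningCode mem' pv = GifFilePrivateType.RunningCode mem pv := by
    simp only [gfield]
    exact he.rd (pv + 20) 4 (by omega) (by omega) (by omega)
  have e5 : GifFilePrivateType.RunningBits mem' pv = GifFilePrivateType.RunningBits mem pv := by
    simp only [gfield]
    exact he.rd (pv + 24) 4 (by omega) (by omega) (by omega)
  have e6 : GifFilePrivateType.StackPtr mem' pv = GifFilePrivateType.StackPtr mem pv := by
    simp only [gfield]
    exact he.rd (pv + 40) 4 (by omega) (by omega) (by omega)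
  obtain ⟨k1, k2, k3, k4, k5, k6, k7, k8, _⟩ := h
  refine ⟨⟨?_, ?_, ?_, ?_, ?_, ?_, ?_, ?_, ?_⟩, e5⟩
  · rw [e1]
    exact k1
  · rw [e2]
    exact k2
  · rw [e3, e2]
    exact k3
  · rw [e2, e4]
    exact k4
  · rw [e4]
    exact k5
  · rw [e1, e5]
    exact k6
  · rw [e5]
    exact k7
  · rw [e6]
    exact k8
  · rw [e5]
    exact hsh

/-- **A WINDOW A ROUND OF THE FILL LOOP STORES TO** (besides the callee's footprint): the stack below the body's stack pointer
`[RA − 352, RA − 120)` (the return addresses of the check routines), or `CrntShiftState` / `CrntShiftDWord` `[pv + 44, pv + 56)`. -/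
def di2_Scratch (F : Forest) (e : State) (w : Span) : Prop :=
  ((e.reg .rsp).toNat - 352 ≤ w.lo ∧ w.hi ≤ (e.reg .rsp).toNat - 120) ∨
  (F.pv + 44 ≤ w.lo ∧ w.hi ≤ F.pv + 56)

/-- **`Body` THROUGH A ROUND'S OWN STORES.** `v` is a state with `Body`, `s` a later state of the same segment with no contract call
in between: the stack pointer is the body's, `r13`, `r14`, `r15` are kept, the text is unchanged, the ABI's invariant holds, no
shadow byte was written, and every window written is a `di2_Scratch` window. Then `Body` holds of `s` (at the address `s` is at),
the reader's measure and `Buf[0]` are what they were, and the memories agree on `[pv + 8, pv + 44)`. -/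
theorem di2_body_carry {cut cut' : Word} {H : Heap} {rest : List Obj} {frames : List (Nat × FrameLayout)} {F : Forest} {R : Rd}
    {u₀ e : State} {ret : Word} {v s : State}
    (hb : DGifDecompressInput.Body cut H rest frames F R u₀ e ret v)
    (hrip : s.rip = cut') (hrsp : s.reg .rsp = e.reg .rsp - 120)
    (hr13 : s.reg .r13 = v.reg .r13) (hr14 : s.reg .r14 = v.reg .r14) (hr15 : s.reg .r15 = v.reg .r15)
    (hcode : Mem.EqOn ProgX.Base.L.textLo ProgX.Base.L.textHi u₀.mem s.mem) (habi : (conv u₀).inv s)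
    {ws : List Span} (hun : ShadowUntouched v.mem s.mem) (hs : Mem.SameExcept ws v.mem s.mem)
    (hws : ∀ w, w ∈ ws → di2_Scratch F e w) :
    DGifDecompressInput.Body cut' H rest frames F R u₀ e ret s ∧
    Gif.Spec.rem R s.mem = Gif.Spec.rem R v.mem ∧
    rd s.mem (F.pv + 88) 1 = rd v.mem (F.pv + 88) 1 ∧
    Mem.EqOn (F.pv + 8) (F.pv + 44) v.mem s.mem := by
  have henv : Env H rest frames F R e := hb.pre.1
  have hroom : 0x700000 + 352 ≤ (e.reg .rsp).toNat := hb.entry.room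
  have htop : (e.reg .rsp).toNat + 8 ≤ 0x800000 := hb.entry.top
  have hok := hb.inv.heap
  have hcur := henv.ctx.cursor_range henv.heap.inv.shadow
  have hbase := henv.heap.base
  have hpin0 := hb.ok.owns.inside hok (o := (F.pv, 24936)) (List.mem_cons_of_mem _ List.mem_cons_self)
  simp only at hpin0
  rw [hbase] at hpin0
  have hpin : 0x800040 ≤ F.pv ∧ F.pv + 24968 ≤ 0xC00000 := by omega
  clear hpin0
  -- every window is loose
  have hloose : ∀ w, w ∈ ws → Loose H F R w := by
    intro w hw
    rcases hws w hw with ⟨a, b⟩ | ⟨a, b⟩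
    · exact Loose.stack hok (by omega) (by omega) (by omega)
    · exact Loose.pvBody (Or.inl ⟨by omega, by omega⟩)
  -- every window is a heap window
  have hwin : ∀ w, w ∈ ws → HeapWin H w := by
    intro w hw
    rcases hws w hw with ⟨a, b⟩ | ⟨a, b⟩
    · apply HeapWin.offHeap hok
      left
      omega
    · exact HeapWin.pv hok hb.ok.owns (by omega) (by omega)
  -- every window misses the cursor
  have hoffcur : ∀ w, w ∈ ws → w.hi ≤ R.cur ∨ R.cur + 16 ≤ w.lo := by
    intro w hw
    rcases hws w hw with ⟨a, b⟩ | ⟨a, b⟩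
    · omega
    · omega
  -- every window misses the saved registers' slots and the return-address slot
  have hslots : ∀ a k : Nat, ((e.reg .rsp).toNat - 120 ≤ a ∧ a + k ≤ (e.reg .rsp).toNat + 8) →
      ∀ w, w ∈ ws → a + k ≤ w.lo ∨ w.hi ≤ a := by
    intro a k hak w hw
    rcases hws w hw with ⟨p, q⟩ | ⟨p, q⟩
    · omega
    · omega
  -- the footprint since the entry: every window lies inside one of the contract's
  have hsameE : Mem.SameExcept
      [⟨(e.reg .rsp).toNat - 352, (e.reg .rsp).toNat⟩,
       shadowSpan ((e.reg .rsp).toNat - 120) ((e.reg .rsp).toNat - 56),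
       ⟨F.pv + 20, F.pv + 32⟩,
       ⟨F.pv + 44, F.pv + 56⟩,
       ⟨F.pv + 88, F.pv + 344⟩,
       ⟨(e.reg .rsi).toNat, (e.reg .rsi).toNat + 4⟩,
       ⟨F.gif + 96, F.gif + 100⟩,
       ⟨R.cur, R.cur + 8⟩] e.mem s.mem := by
    apply Mem.SameExcept.step_same' hb.same hs
    intro w hw
    by_cases hempty : w.hi ≤ w.lo
    · left
      exact hempty
    right
    rcases hws w hw with ⟨a, b⟩ | ⟨a, b⟩
    · exact ⟨⟨(e.reg .rsp).toNat - 352, (e.reg .rsp).toNat⟩, by simp only [List.mem_cons, true_or], by simp only; omega,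
        by simp only; omega⟩
    · exact ⟨⟨F.pv + 44, F.pv + 56⟩, by simp only [List.mem_cons, true_or, or_true], by simp only; omega, by simp only; omega⟩
  have e_rem : Gif.Spec.rem R s.mem = Gif.Spec.rem R v.mem := rem_sameExcept hs (by omega) hoffcur
  refine ⟨⟨hb.entry, hb.pre, hrip, hrsp, hr13.trans hb.r13, hr15.trans hb.r15, hr14.trans hb.r14, ?_, ?_, ?_, ?_, ?_, ?_, ?_, ?_,
    ?_, ?_, hsameE, ProgX.Base.conv_code_in hcode, habi⟩, e_rem, ?_, ?_⟩
  · exact slot_sameExcept hs (e.reg .rsp) 8 8 _ (by omega) (by omega) hb.slot_r15 (hslots _ _ (by omega))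
  · exact slot_sameExcept hs (e.reg .rsp) 16 8 _ (by omega) (by omega) hb.slot_r14 (hslots _ _ (by omega))
  · exact slot_sameExcept hs (e.reg .rsp) 24 8 _ (by omega) (by omega) hb.slot_r13 (hslots _ _ (by omega))
  · exact slot_sameExcept hs (e.reg .rsp) 32 8 _ (by omega) (by omega) hb.slot_r12 (hslots _ _ (by omega))
  · exact slot_sameExcept hs (e.reg .rsp) 40 8 _ (by omega) (by omega) hb.slot_rbp (hslots _ _ (by omega))
  · exact slot_sameExcept hs (e.reg .rsp) 48 8 _ (by omega) (by omega) hb.slot_rbx (hslots _ _ (by omega))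
  · rw [hs.readLE (e.reg .rsp) 8 (by omega) (hslots _ _ (by omega))]
    exact hb.slot_ra
  · exact hb.inv.sameExcept hun hs hwin
  · exact hb.ok.sameExcept hok ⟨hcur.1, hcur.2.1⟩ hs hloose
  · rw [e_rem]
    exact hb.rem
  · apply hs.rd (F.pv + 88) 1 (by omega)
    intro w hw
    rcases hws w hw with ⟨a, b⟩ | ⟨a, b⟩
    · omega
    · omega
  · apply hs.eqOn
    intro w hw
    rcases hws w hw with ⟨a, b⟩ | ⟨a, b⟩
    · omega
    · omega

/-- **At 106829H (ret4), `DGifBufferedInput(gif, Private->Buf, &NextByte)` has returned**: `Body`; `rbx = Private`; the loop's form of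
the LZW field ranges; the round's measure `m` is still `RunningBits − CrntShiftState` and the loop's test was TRUE (`CrntShiftState <
RunningBits`: the callee wrote neither field); `eax` is GIF_OK or GIF_ERROR, and GIF_OK means `rem + Buf[0]` went down by at least 1:
the function's measure `mu` is at least 8 below the entry's. -/
structure di2_AtRet4 (m : Nat) (H : Heap) (rest : List Obj) (frames : List (Nat × FrameLayout)) (F : Forest) (R : Rd) (u₀ e : State)
    (ret : Word) (v : State) : Prop where
  body : DGifDecompressInput.Body Gif.L.DGifDecompressInput.ret4 H rest frames F R u₀ e ret v
  /-- `rbx = Private` (callee-saved) -/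
  rbx : (v.reg .rbx).toNat = F.pv
  /-- the LZW field ranges, the loop's form -/
  lz : DGifDecompressInput.LZLoop v.mem F.pv
  /-- the measure of the loop, as at the head -/
  measure : GifFilePrivateType.RunningBits v.mem F.pv - GifFilePrivateType.CrntShiftState v.mem F.pv = m
  /-- the loop's test l.1083 was true -/
  test : GifFilePrivateType.CrntShiftState v.mem F.pv < GifFilePrivateType.RunningBits v.mem F.pv
  /-- GIF_OK or GIF_ERROR -/
  res : IsBool v
  /-- GIF_OK: a byte was delivered, `8 · (rem + Buf[0])` went down by at least 8 -/
  mu_ok : (v.reg .rax).toNat = 1 → mu R v.mem F.pv + 8 ≤ mu R e.mem F.pv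

/-- **106807H … 10688EH | the call of DGifBufferedInput … 106829H (ret4)** (dgif_lib.c:1083-1085): the checked load of
`CrntShiftState`, the loop's test `CrntShiftState < RunningBits` (signed 32-bit; both are small); false: `Tail` (only the check's
return address was stored); true: `DGifBufferedInput(gif, Private->Buf, &NextByte)` with `rdx = rsp + 0x20 = RA − 88`, the frame's
object `NextByte`. -/
theorem di2_seg_head (Lay : Layout) (hLay : Lay.hi = 0x1000000) (μ : Microarch) (hμ : UserX.MicroOK μ) (u₀ : State)
    (hcode : HasCodeNat Lay u₀ Gif.L.DGifDecompressInput.entry Gif.Code.code_DGifDecompressInput.nat Gif.L.DGifDecompressInput.size)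
    (H : Heap) (rest : List Obj) (frames : List (Nat × FrameLayout)) (F : Forest) (R : Rd) (e : State) (ret : Word) (m : Nat)
    (h_DGifBufferedInput : Calls Lay μ ProgX.Base.WayInv (ProgX.Base.conv u₀) Gif.L.DGifBufferedInput.entry
      (Gif.Spec.DGifBufferedInput.spec H rest (DGifDecompressInput.framesIn frames e) F R))
    (h_asan_load4_noabort : Asan.SmallCheck Lay μ ProgX.Base.WayInv (ProgX.Base.CodeOK u₀) [.rax, .rcx, .rdx] 4
      ProgX.Base.L.__asan_load4_noabort.entry)
    (v : State) (hat : DGifDecompressInput.Head m H rest frames F R u₀ e ret v) :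
    ReachVia Lay μ ProgX.Base.WayInv v (fun w =>
      DGifDecompressInput.Tail H rest frames F R u₀ e ret w ∨ di2_AtRet4 m H rest frames F R u₀ e ret w) := by
  -- THE PRELUDE: the entry assertion `Head` = `Body` + `rbx` + `LZLoop` + the two measures
  obtain ⟨hbody, hrbx, hlz, hmeas, hmu⟩ := hat
  have he := hbody.entry
  v_entry he
  obtain ⟨henv, hlz0, hrdi, hcodeptr⟩ := hbody.pre
  -- what the walker reads of a segment's entry state
  have w_rip := hbody.rip
  have c_rsp : v.reg .rsp = e.reg .rsp - 120 := hbody.rsp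
  have c_r13 : v.reg .r13 = e.reg .rdi := hbody.r13
  have w_kept : RegsKept [.rsp] v v := RegsKept.refl _ _
  have w_eq : Mem.EqOn ProgX.Base.L.textLo ProgX.Base.L.textHi u₀.mem v.mem := ProgX.Base.conv_code_eqOn hbody.code
  have hdf := (show abiInv _ from hbody.abi).1
  have hmx := (show abiInv _ from hbody.abi).2
  have hsse := ProgX.Base.sseOK_of_abiInv hbody.abi
  -- the slots and the footprint that `Body` behind the call states again
  have k_r15 : v.mem.readLE (e.reg .rsp - 8) 8 = (e.reg .r15).toNat := hbody.slot_r15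
  have k_r14 : v.mem.readLE (e.reg .rsp - 16) 8 = (e.reg .r14).toNat := hbody.slot_r14
  have k_r13 : v.mem.readLE (e.reg .rsp - 24) 8 = (e.reg .r13).toNat := hbody.slot_r13
  have k_r12 : v.mem.readLE (e.reg .rsp - 32) 8 = (e.reg .r12).toNat := hbody.slot_r12
  have k_rbp : v.mem.readLE (e.reg .rsp - 40) 8 = (e.reg .rbp).toNat := hbody.slot_rbp
  have k_rbx : v.mem.readLE (e.reg .rsp - 48) 8 = (e.reg .rbx).toNat := hbody.slot_rbx
  have k_ra : UInt64.ofNat (v.mem.readLE (e.reg .rsp) 8) = ret := hbody.slot_ra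
  have hsame : Mem.SameExcept
    [⟨(e.reg .rsp).toNat - 352, (e.reg .rsp).toNat⟩,
     shadowSpan ((e.reg .rsp).toNat - 120) ((e.reg .rsp).toNat - 56),
     ⟨F.pv + 20, F.pv + 32⟩,
     ⟨F.pv + 44, F.pv + 56⟩,
     ⟨F.pv + 88, F.pv + 344⟩,
     ⟨(e.reg .rsi).toNat, (e.reg .rsi).toNat + 4⟩,
     ⟨F.gif + 96, F.gif + 100⟩,
     ⟨R.cur, R.cur + 8⟩] e.mem v.mem := hbody.same
  -- where the cursor, gif and pv are, as numbers
  have hcur := henv.ctx.cursor_range henv.heap.inv.shadow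
  have hbase := henv.heap.base
  have hgin0 := hbody.ok.owns.inside hbody.inv.heap (o := (F.gif, 120)) List.mem_cons_self
  have hpin0 := hbody.ok.owns.inside hbody.inv.heap (o := (F.pv, 24936)) (List.mem_cons_of_mem _ List.mem_cons_self)
  simp only at hgin0 hpin0
  rw [hbase] at hgin0 hpin0
  have hgin : 0x800040 ≤ F.gif ∧ F.gif + 152 ≤ 0xC00000 := by omega
  have hpin : 0x800040 ≤ F.pv ∧ F.pv + 24968 ≤ 0xC00000 := by omega
  clear hgin0 hpin0
  -- the two fields the test reads, as numbers `rb` = RunningBits ≤ 12 and `cs` = CrntShiftState ≤ 19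
  obtain ⟨rb, l_bits⟩ : ∃ rb, v.mem.readLE (v.reg .rbx + 24) 4 = rb := ⟨_, rfl⟩
  obtain ⟨cs, l_state⟩ : ∃ cs, v.mem.readLE (v.reg .rbx + 44) 4 = cs := ⟨_, rfl⟩
  have hrb : GifFilePrivateType.RunningBits v.mem F.pv = rb := by
    simp only [gfield]
    rw [← rd_eq_readLE v.mem (v.reg .rbx + 24) (F.pv + 24) 4 (by u_omega)]
    exact l_bits
  have hcs : GifFilePrivateType.CrntShiftState v.mem F.pv = cs := by
    simp only [gfield]
    rw [← rd_eq_readLE v.mem (v.reg .rbx + 44) (F.pv + 44) 4 (by u_omega)]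
    exact l_state
  have hrb12 : rb ≤ 12 := by
    rw [← hrb]
    exact hlz.bits_hi
  have hcs19 : cs ≤ 19 := by
    have := hlz.shift
    rw [hrb, hcs] at this
    omega
  have erb : (BitVec.ofNat 32 rb).toInt = (rb : Int) := cnt32_toInt rb (by omega)
  have ecs : (BitVec.ofNat 32 cs).toInt = (cs : Int) := cnt32_toInt cs (by omega)
  -- pv is live under the body's frames: what the check goal asks
  have hpl : LiveIn (H.liveObjs ++ rest) (DGifDecompressInput.framesIn frames e) F.pv 24936 :=
    hbody.ok.pv_live.liveIn rest _ (Nat.le_refl _) (Nat.le_refl _)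
  -- THE WALK
  u_walk hcode [hμ.vendor] until [Gif.L.DGifDecompressInput.ret4, Gif.L.DGifDecompressInput.at_10688e]
    span [ProgX.Base.L.textLo, ProgX.Base.L.textHi] side (v_side)
  case check_10680b =>
    -- dgif_lib.c:1083 the load of `Private->CrntShiftState`: 4 bytes inside pv
    have hun : ShadowUntouched v.mem s_10680b.mem := by v_untouched
    exact hpl.accSmall hbody.inv.shadow hun _ 4 (by decide) (by u_omega) (by u_omega)
  case call_inv =>
    v_inv
  case pre_106824 =>
    -- DGIFBUFFEREDINPUT'S PRECONDITION. The environment for the frame list with the own frame in front: only return addresses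
    -- were pushed since `v`
    have hs : Mem.SameExcept [⟨(e.reg .rsp).toNat - 352, (e.reg .rsp).toNat - 120⟩] v.mem s_106824.mem := by
      rw [w_mem]
      u_same
    have henv' : Env H rest (DGifDecompressInput.framesIn frames e) F R s_106824 := by
      refine henv.at_call hbody.inv hbody.ok hs (by omega) (by omega) ?_ ?_ ?_
      · rw [w_rsp]
        u_omega
      · rw [w_rsp]
        u_omega
      · rw [w_rsp]
        u_omega
    -- the out-pointer is the frame's object `NextByte` (`[rsp + 0x20]` = base + 32, 1 byte), named by its numbers
    have ho : (⟨(e.reg .rsp).toNat - 120 + 32, 1, .stack⟩ : Obj) ∈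
        Gif.Frames.DGifDecompressInput.objsAt ((e.reg .rsp).toNat - 120) := List.mem_cons_self
    have hsz : Gif.Frames.DGifDecompressInput.size = 64 := rfl
    have hb : (e.reg .rsp).toNat - 120 + Gif.Frames.DGifDecompressInput.size ≤ (e.reg .rsp).toNat + 8 := by
      rw [hsz]
      omega
    have hrdx : (s_106824.reg .rdx).toNat = (e.reg .rsp).toNat - 120 + 32 := by
      rw [w_rdx]
      u_omega
    have hout : OutPtr H rest (DGifDecompressInput.framesIn frames e) F R (s_106824.reg .rdx).toNat 1 := by
      rw [hrdx]
      exact OutPtr.own henv.heap henv.ctx hbody.inv hb ho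
    refine ⟨henv', ?_, ?_, hout⟩
    · rw [w_rdi]
      exact hrdi
    · rw [w_rsi]
      u_omega
  · -- EXIT 0x10688e (l.1093) from the `jge` of l.1083: `RunningBits ≤ CrntShiftState`; only the check's return address was stored
    rw [erb, ecs] at hbr_106816
    have hun : ShadowUntouched v.mem s_106816.mem := by v_untouched
    have hs : Mem.SameExcept [⟨(e.reg .rsp).toNat - 352, (e.reg .rsp).toNat - 120⟩] v.mem s_106816.mem := by
      rw [w_mem]
      u_same
    have habi : (conv u₀).inv s_106816 := by
      refine ProgX.Base.abiInv_of ?_ ?_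
      · rw [w_flags]
        simp only [X86.User.df_setStatus]
        exact w_df_10680b
      · rw [w_mxcsr]
        exact hmx
    obtain ⟨k_body, k_rem, k_buf0, k_eq⟩ :=
      di2_body_carry (cut' := Gif.L.DGifDecompressInput.at_10688e) hbody w_rip w_rsp (w_kept.get .r13 rfl) (w_kept.get .r14 rfl)
        (w_kept.get .r15 rfl) w_eq habi hun hs (by
          simp only [List.forall_mem_cons, List.not_mem_nil, false_imp_iff, implies_true, and_true, di2_Scratch]
          omega)
    -- `CrntShiftState` was not stored to
    have k_cs : GifFilePrivateType.CrntShiftState s_106816.mem F.pv = cs := by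
      rw [← hcs]
      simp only [gfield]
      apply hs.rd (F.pv + 44) 4 (by omega)
      simp only [List.forall_mem_cons, List.not_mem_nil, false_imp_iff, implies_true, and_true]
      omega
    obtain ⟨k_lz, k_rb⟩ := di2_lzloop_carry hlz k_eq (by omega) (by
      have hsh := hlz.shift
      rw [hcs, hrb] at hsh
      rw [k_cs, hrb]
      exact hsh)
    rw [hrb] at k_rb
    refine ReachVia.done (Or.inl ⟨k_body, ?_, ?_, k_lz, ?_, ?_⟩)
    · rw [w_kept.get .rbx rfl]
      exact hrbx
    · rw [w_rbp, k_rb]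
      exact toNat_ofBV_ofNat32 rb (by omega)
    · rw [k_rb, k_cs]
      omega
    · have hmu' : mu R s_106816.mem F.pv = mu R v.mem F.pv := by
        unfold mu
        rw [k_rem, k_buf0, k_cs, hcs]
      rw [hmu']
      exact hmu
  · -- 0x106829 (ret4): DGIFBUFFEREDINPUT HAS RETURNED. The loop's test was true: `CrntShiftState < RunningBits`
    rw [erb, ecs] at hbr_106816
    obtain ⟨hback, hres, hdown⟩ := w_post
    -- the callee's entry state differs from `v` by the pushed return addresses only
    have hs0 : Mem.SameExcept [⟨(e.reg .rsp).toNat - 352, (e.reg .rsp).toNat - 120⟩] v.mem s_106824.mem := by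
      rw [w_mem_106824]
      u_same
    have hrem0 : Gif.Spec.rem R s_106824.mem = Gif.Spec.rem R v.mem := by
      apply rem_sameExcept hs0 (by omega)
      simp only [List.forall_mem_cons, List.not_mem_nil, false_imp_iff, implies_true, and_true]
      omega
    have hbuf0 : rd s_106824.mem (F.pv + 88) 1 = rd v.mem (F.pv + 88) 1 := by
      apply hs0.rd (F.pv + 88) 1 (by omega)
      simp only [List.forall_mem_cons, List.not_mem_nil, false_imp_iff, implies_true, and_true]
      omega
    have e_top : (s_106824.reg .rsp).toNat + 8 = (e.reg .rsp).toNat - 120 := by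
      rw [w_rsp_106824]
      u_omega
    -- the callee's footprint in terms of `v` (`w_same : SameExcept […] (v.mem.writeLE …) s_106824r.mem`)
    v_after_call w_rsp_106824 w_mem_106824
    simp only [w_rdx_106824] at w_same
    -- THE SLOTS AND THE RETURN ADDRESS, over the pushed return address (first step) and through the callee's footprint (second step)
    have hp15 : s_106824.mem.readLE (e.reg .rsp - 8) 8 = (e.reg .r15).toNat := by
      rw [w_mem_106824]
      u_frame k_r15
    rw [w_mem_106824] at hp15
    have hs15 : s_106824r.mem.readLE (e.reg .rsp - 8) 8 = (e.reg .r15).toNat := by u_frame hp15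
    have hp14 : s_106824.mem.readLE (e.reg .rsp - 16) 8 = (e.reg .r14).toNat := by
      rw [w_mem_106824]
      u_frame k_r14
    rw [w_mem_106824] at hp14
    have hs14 : s_106824r.mem.readLE (e.reg .rsp - 16) 8 = (e.reg .r14).toNat := by u_frame hp14
    have hp13 : s_106824.mem.readLE (e.reg .rsp - 24) 8 = (e.reg .r13).toNat := by
      rw [w_mem_106824]
      u_frame k_r13
    rw [w_mem_106824] at hp13
    have hs13 : s_106824r.mem.readLE (e.reg .rsp - 24) 8 = (e.reg .r13).toNat := by u_frame hp13
    have hp12 : s_106824.mem.readLE (e.reg .rsp - 32) 8 = (e.reg .r12).toNat := by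
      rw [w_mem_106824]
      u_frame k_r12
    rw [w_mem_106824] at hp12
    have hs12 : s_106824r.mem.readLE (e.reg .rsp - 32) 8 = (e.reg .r12).toNat := by u_frame hp12
    have hpbp : s_106824.mem.readLE (e.reg .rsp - 40) 8 = (e.reg .rbp).toNat := by
      rw [w_mem_106824]
      u_frame k_rbp
    rw [w_mem_106824] at hpbp
    have hsbp : s_106824r.mem.readLE (e.reg .rsp - 40) 8 = (e.reg .rbp).toNat := by u_frame hpbp
    have hpbx : s_106824.mem.readLE (e.reg .rsp - 48) 8 = (e.reg .rbx).toNat := by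
      rw [w_mem_106824]
      u_frame k_rbx
    rw [w_mem_106824] at hpbx
    have hsbx : s_106824r.mem.readLE (e.reg .rsp - 48) 8 = (e.reg .rbx).toNat := by u_frame hpbx
    have hpra : UInt64.ofNat (s_106824.mem.readLE (e.reg .rsp) 8) = ret := by
      rw [w_mem_106824]
      u_frame k_ra
    rw [w_mem_106824] at hpra
    have hsra : UInt64.ofNat (s_106824r.mem.readLE (e.reg .rsp) 8) = ret := by u_frame hpra
    -- the LZW scalars `[pv + 8, pv + 48)`: not in the callee's footprint
    have hpq : Mem.SameExcept
      [⟨(e.reg .rsp).toNat - 352, (e.reg .rsp).toNat⟩,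
       ⟨F.pv + 88, F.pv + 344⟩,
       ⟨F.gif + 96, F.gif + 100⟩,
       ⟨R.cur, R.cur + 8⟩] v.mem s_106824r.mem := by u_same
    -- the footprint since the entry: the callee's windows lie inside the function's
    have hsame1 : Mem.SameExcept
      [⟨(e.reg .rsp).toNat - 352, (e.reg .rsp).toNat⟩,
       shadowSpan ((e.reg .rsp).toNat - 120) ((e.reg .rsp).toNat - 56),
       ⟨F.pv + 20, F.pv + 32⟩,
       ⟨F.pv + 44, F.pv + 56⟩,
       ⟨F.pv + 88, F.pv + 344⟩,
       ⟨(e.reg .rsi).toNat, (e.reg .rsi).toNat + 4⟩,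
       ⟨F.gif + 96, F.gif + 100⟩,
       ⟨R.cur, R.cur + 8⟩] e.mem s_106824r.mem := by u_same
    have hmiss : ∀ w, w ∈ [(⟨(e.reg .rsp).toNat - 352, (e.reg .rsp).toNat⟩ : Span), ⟨F.pv + 88, F.pv + 344⟩,
        ⟨F.gif + 96, F.gif + 100⟩, ⟨R.cur, R.cur + 8⟩] → w.hi ≤ F.pv + 8 ∨ F.pv + 48 ≤ w.lo := by
      have hfar := hbody.ok.owns.far hbody.inv.heap (a := (F.gif, 120)) (b := (F.pv, 24936)) List.mem_cons_self
        (List.mem_cons_of_mem _ List.mem_cons_self) (by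
          intro h
          exact hbody.ok.gif_ne_pv (congrArg Prod.fst h))
      simp only at hfar
      simp only [List.forall_mem_cons, List.not_mem_nil, false_imp_iff, implies_true, and_true]
      omega
    have k_eq : Mem.EqOn (F.pv + 8) (F.pv + 48) v.mem s_106824r.mem := by
      apply hpq.eqOn
      intro w hw
      have := hmiss w hw
      omega
    have k_cs : GifFilePrivateType.CrntShiftState s_106824r.mem F.pv = cs := by
      rw [← hcs]
      simp only [gfield]
      exact k_eq.rd (F.pv + 44) 4 (by omega) (by omega) (by omega)
    obtain ⟨k_lz, k_rb⟩ := di2_lzloop_carry hlz (k_eq.mono (Nat.le_refl _) (by omega)) (by omega) (by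
      have hsh := hlz.shift
      rw [hcs, hrb] at hsh
      rw [k_cs, hrb]
      exact hsh)
    rw [hrb] at k_rb
    -- the heap's invariant comes back with the clean stack at the callee's `rsp + 8` = the body's `rsp`
    have hinv1 : HeapInv H rest (DGifDecompressInput.framesIn frames e) ((e.reg .rsp).toNat - 120) s_106824r.mem := by
      rw [← e_top]
      exact hback.inv
    -- THE EXIT ASSERTION: `Body` at `ret4` …
    have hbody1 : DGifDecompressInput.Body Gif.L.DGifDecompressInput.ret4 H rest frames F R u₀ e ret s_106824r := {
      entry := hbody.entry
      pre := hbody.pre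
      rip := w_rip
      rsp := w_rsp
      r13 := (w_kept.get .r13 rfl).trans hbody.r13
      r15 := (w_kept.get .r15 rfl).trans hbody.r15
      r14 := (w_kept.get .r14 rfl).trans hbody.r14
      slot_r15 := hs15
      slot_r14 := hs14
      slot_r13 := hs13
      slot_r12 := hs12
      slot_rbp := hsbp
      slot_rbx := hsbx
      slot_ra := hsra
      inv := hinv1
      ok := hback.ok
      rem := by
        have h1 := hback.rem
        rw [hrem0] at h1
        exact Nat.le_trans h1 hbody.rem
      same := hsame1
      code := w_code
      abi := w_inv
    }
    -- … and what is live at `ret4`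
    refine ReachVia.done (Or.inr ?_)
    exact {
      body := hbody1
      rbx := by
        rw [w_kept.get .rbx rfl]
        exact hrbx
      lz := k_lz
      measure := by
        rw [k_rb, k_cs, ← hrb, ← hcs]
        exact hmeas
      test := by
        rw [k_rb, k_cs]
        omega
      res := hres
      mu_ok := by
        intro h1
        have hd := hdown h1
        rw [hrem0, hbuf0] at hd
        have hmu' := hmu
        unfold mu at hmu' ⊢
        rw [k_cs]
        rw [hcs] at hmu'
        omega
    }

/-- **`add ecx, 8` on a small value** (l.1091 `CrntShiftState += 8`), as the walker leaves the stored value. -/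
theorem di2_add8 (cs : Nat) (h : cs + 8 < 2 ^ 32) : (BitVec.ofNat 32 cs + 8#32).toNat = cs + 8 := by
  rw [← BitVec.ofNat_add]
  exact toNat_ofNat32 (cs + 8) h

/-- **106829H (ret4) … 106874H | 106807H** (dgif_lib.c:1085-1091): `test eax, eax`; GIF_ERROR: to the epilogue with `eax = 0` (nothing
stored; `LZOK` again because the round was entered with `CrntShiftState < RunningBits ≤ 12`); GIF_OK: the checked loads of
`CrntShiftDWord` and `CrntShiftState`, `CrntShiftDWord |= NextByte << CrntShiftState`, `CrntShiftState += 8`, and the head again with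
the measure `RunningBits − (CrntShiftState + 8) < m`. -/
theorem di2_seg_tail (Lay : Layout) (hLay : Lay.hi = 0x1000000) (μ : Microarch) (hμ : UserX.MicroOK μ) (u₀ : State)
    (hcode : HasCodeNat Lay u₀ Gif.L.DGifDecompressInput.entry Gif.Code.code_DGifDecompressInput.nat Gif.L.DGifDecompressInput.size)
    (H : Heap) (rest : List Obj) (frames : List (Nat × FrameLayout)) (F : Forest) (R : Rd) (e : State) (ret : Word) (m : Nat)
    (h_asan_load4_noabort : Asan.SmallCheck Lay μ ProgX.Base.WayInv (ProgX.Base.CodeOK u₀) [.rax, .rcx, .rdx] 4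
      ProgX.Base.L.__asan_load4_noabort.entry)
    (h_asan_load8_noabort : Asan.SmallCheck Lay μ ProgX.Base.WayInv (ProgX.Base.CodeOK u₀) [.rax, .rcx, .rdx] 8
      ProgX.Base.L.__asan_load8_noabort.entry)
    (v : State) (hat : di2_AtRet4 m H rest frames F R u₀ e ret v) :
    ReachVia Lay μ ProgX.Base.WayInv v (fun w =>
      (∃ m', m' < m ∧ DGifDecompressInput.Head m' H rest frames F R u₀ e ret w) ∨
      DGifDecompressInput.Done H rest frames F R u₀ e ret w) := by
  -- THE PRELUDE: the entry assertion, as in `di2_seg_head`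
  obtain ⟨hbody, hrbx, hlz, hmeas, htest, hres, hmuok⟩ := hat
  have he := hbody.entry
  v_entry he
  obtain ⟨henv, hlz0, hrdi, hcodeptr⟩ := hbody.pre
  have w_rip := hbody.rip
  have c_rsp : v.reg .rsp = e.reg .rsp - 120 := hbody.rsp
  -- `eax` as a variable `z` (the branch fact of `test eax, eax` speaks of it)
  obtain ⟨z, c_rax⟩ : ∃ z, v.reg .rax = z := ⟨_, rfl⟩
  unfold IsBool at hres
  rw [c_rax] at hres hmuok
  have w_kept : RegsKept [.rsp] v v := RegsKept.refl _ _
  have w_eq : Mem.EqOn ProgX.Base.L.textLo ProgX.Base.L.textHi u₀.mem v.mem := ProgX.Base.conv_code_eqOn hbody.code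
  have hdf := (show abiInv _ from hbody.abi).1
  have hmx := (show abiInv _ from hbody.abi).2
  have hsse := ProgX.Base.sseOK_of_abiInv hbody.abi
  -- where the cursor and pv are, as numbers
  have hcur := henv.ctx.cursor_range henv.heap.inv.shadow
  have hbase := henv.heap.base
  have hpin0 := hbody.ok.owns.inside hbody.inv.heap (o := (F.pv, 24936)) (List.mem_cons_of_mem _ List.mem_cons_self)
  simp only at hpin0
  rw [hbase] at hpin0
  have hpin : 0x800040 ≤ F.pv ∧ F.pv + 24968 ≤ 0xC00000 := by omega
  clear hpin0
  -- what the round loads, as numbers: `cs` = CrntShiftState, `dw` = CrntShiftDWord, `nb` = NextByte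
  obtain ⟨cs, l_state⟩ : ∃ cs, v.mem.readLE (v.reg .rbx + 44) 4 = cs := ⟨_, rfl⟩
  obtain ⟨dw, l_dword⟩ : ∃ dw, v.mem.readLE (v.reg .rbx + 48) 8 = dw := ⟨_, rfl⟩
  obtain ⟨nb, l_next⟩ : ∃ nb, v.mem.readLE (e.reg .rsp - 88) 1 = nb := ⟨_, rfl⟩
  have hcs : GifFilePrivateType.CrntShiftState v.mem F.pv = cs := by
    simp only [gfield]
    rw [← rd_eq_readLE v.mem (v.reg .rbx + 44) (F.pv + 44) 4 (by u_omega)]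
    exact l_state
  have hrb12 := hlz.bits_hi
  -- pv is live under the body's frames: what both check goals ask
  have hpl : LiveIn (H.liveObjs ++ rest) (DGifDecompressInput.framesIn frames e) F.pv 24936 :=
    hbody.ok.pv_live.liveIn rest _ (Nat.le_refl _) (Nat.le_refl _)
  -- THE WALK, both arms
  u_walk hcode [hμ.vendor] until [Gif.L.DGifDecompressInput.at_106807, Gif.L.DGifDecompressInput.at_106874]
    span [ProgX.Base.L.textLo, ProgX.Base.L.textHi] side (v_side)
  case check_106831 =>
    -- dgif_lib.c:1089 the load of `Private->CrntShiftDWord`: 8 bytes inside pv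
    have hun : ShadowUntouched v.mem s_106831.mem := by v_untouched
    exact hpl.accSmall hbody.inv.shadow hun _ 8 (by decide) (by u_omega) (by u_omega)
  case check_106844 =>
    -- dgif_lib.c:1090 the load of `Private->CrntShiftState`: 4 bytes inside pv
    have hun : ShadowUntouched v.mem s_106844.mem := by v_untouched
    exact hpl.accSmall hbody.inv.shadow hun _ 4 (by decide) (by u_omega) (by u_omega)
  · -- EXIT 0x106874 from the `je` of l.1085: DGifBufferedInput failed, `eax = 0`; nothing was stored
    have hz : z.toNat = 0 := by
      rw [toNat_part32] at hbr_10682b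
      omega
    have hun : ShadowUntouched v.mem s_10682b.mem := by v_untouched
    have hs : Mem.SameExcept [] v.mem s_10682b.mem := by
      rw [w_mem]
      exact Mem.SameExcept.refl _ _
    have habi : (conv u₀).inv s_10682b := by
      refine ProgX.Base.abiInv_of ?_ ?_
      · rw [w_flags]
        simp only [X86.User.df_setStatus]
        exact hdf
      · rw [w_mxcsr]
        exact hmx
    obtain ⟨k_body, _, _, _⟩ :=
      di2_body_carry (cut' := Gif.L.DGifDecompressInput.at_106874) hbody w_rip w_rsp (w_kept.get .r13 rfl) (w_kept.get .r14 rfl)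
        (w_kept.get .r15 rfl) w_eq habi hun hs (by
          intro w hw
          exact absurd hw List.not_mem_nil)
    refine ReachVia.done (Or.inr ⟨k_body, ?_, ?_, ?_⟩)
    · right
      rw [w_kept.get .rax rfl, c_rax]
      exact hz
    · -- the round was entered with `CrntShiftState < RunningBits ≤ 12`
      rw [w_mem]
      apply hlz.to_ok
      omega
    · intro h1
      rw [w_kept.get .rax rfl, c_rax] at h1
      omega
  · -- EXIT 0x106807 (l.1083), the head again: DGifBufferedInput delivered a byte, `eax = 1`
    have hz : z.toNat = 1 := by
      rw [toNat_part32] at hbr_10682b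
      omega
    rw [hcs] at htest hmeas
    -- the value stored to `CrntShiftState` is `cs + 8`
    have hadd := di2_add8 cs (by omega)
    rw [hadd] at w_mem
    -- what was stored: the return addresses of the two checks, `CrntShiftDWord`, `CrntShiftState`
    have hun : ShadowUntouched v.mem s_10685c.mem := by v_untouched
    have hs : Mem.SameExcept [⟨(e.reg .rsp).toNat - 352, (e.reg .rsp).toNat - 120⟩, ⟨F.pv + 44, F.pv + 56⟩]
        v.mem s_10685c.mem := by
      rw [w_mem]
      u_same
    have habi : (conv u₀).inv s_10685c := by
      refine ProgX.Base.abiInv_of ?_ ?_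
      · rw [w_flags]
        simp only [X86.User.df_setStatus]
        exact w_df_106844
      · rw [w_mxcsr]
        exact hmx
    obtain ⟨k_body, k_rem, k_buf0, k_eq⟩ :=
      di2_body_carry (cut' := Gif.L.DGifDecompressInput.at_106807) hbody w_rip w_rsp (w_kept.get .r13 rfl) (w_kept.get .r14 rfl)
        (w_kept.get .r15 rfl) w_eq habi hun hs (by
          simp only [List.forall_mem_cons, List.not_mem_nil, false_imp_iff, implies_true, and_true, di2_Scratch]
          omega)
    -- the new `CrntShiftState`: the outermost store
    have k_cs : GifFilePrivateType.CrntShiftState s_10685c.mem F.pv = cs + 8 := by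
      simp only [gfield]
      rw [w_mem, rd_writeLE_same _ (v.reg .rbx + 44) 4 (cs + 8) (F.pv + 44) (by u_omega) (by decide)]
      omega
    obtain ⟨k_lz, k_rb⟩ := di2_lzloop_carry hlz k_eq (by omega) (by
      rw [k_cs]
      right
      omega)
    -- `Head` with the measure `RunningBits − (CrntShiftState + 8)`
    refine ReachVia.done (Or.inl ⟨GifFilePrivateType.RunningBits v.mem F.pv - (cs + 8), by omega, k_body, ?_, k_lz, ?_, ?_⟩)
    · rw [w_kept.get .rbx rfl]
      exact hrbx
    · rw [k_rb, k_cs]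
    · -- `mu`: `8 · (rem + Buf[0])` went down by at least 8, `CrntShiftState` up by 8
      have hd := hmuok hz
      unfold mu at hd ⊢
      rw [hcs] at hd
      rw [k_rem, k_buf0, k_cs]
      omega

end Gif.Spec.DGifDecompressInput_2
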